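-- pv_equiv track=rewrite | github.com/abstract-surfer/huntress-umbrella-logs | cisco_huntress_connector.py | _get_grouped_category_labels
-- ===== SOURCE A (Python) =====
-- def _get_grouped_category_labels(categories_list):
--     """
--     Groups category labels by their type (e.g., content, application)
--     and returns a dictionary of comma-separated label strings.
--     """
--     grouped_labels = {}
--     if not isinstance(categories_list, list):
--         return {}
--
--     for category in categories_list:
--         cat_type = category.get('type')
--         cat_label = category.get('label')
--
--         if cat_type and cat_label:
--             key_name = f"{cat_type.capitalize()}Categories"
--             if key_name not in grouped_labels:
--                 grouped_labels[key_name] = []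
--             grouped_labels[key_name].append(cat_label)
--
--     for key, labels in grouped_labels.items():
--         grouped_labels[key] = ", ".join(labels)
--
--     return grouped_labels
-- ===== SOURCE B (Python) =====
-- def _get_grouped_category_labels(categories_list):
--     if not isinstance(categories_list, list):
--         return {}
--     pairs = [(f"{c.get('type').capitalize()}Categories", c.get('label'))
--              for c in categories_list if c.get('type') and c.get('label')]
--     keys = list(dict.fromkeys(k for k, _ in pairs))
--     return {k: ", ".join(l for k2, l in pairs if k2 == k) for k in keys}
-- ===== Notes on version B (the rewrite author's own statement) =====
-- stated objective: alternative
-- what changed: B replaces A's dict-of-lists accumulation plus in-place join pass by building the filtered (key, label) pair list once, deduplicating keys in first-occurrence order, and emitting one comma-joined entry per key via a per-key scan of the pairs.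
import Mathlib
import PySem

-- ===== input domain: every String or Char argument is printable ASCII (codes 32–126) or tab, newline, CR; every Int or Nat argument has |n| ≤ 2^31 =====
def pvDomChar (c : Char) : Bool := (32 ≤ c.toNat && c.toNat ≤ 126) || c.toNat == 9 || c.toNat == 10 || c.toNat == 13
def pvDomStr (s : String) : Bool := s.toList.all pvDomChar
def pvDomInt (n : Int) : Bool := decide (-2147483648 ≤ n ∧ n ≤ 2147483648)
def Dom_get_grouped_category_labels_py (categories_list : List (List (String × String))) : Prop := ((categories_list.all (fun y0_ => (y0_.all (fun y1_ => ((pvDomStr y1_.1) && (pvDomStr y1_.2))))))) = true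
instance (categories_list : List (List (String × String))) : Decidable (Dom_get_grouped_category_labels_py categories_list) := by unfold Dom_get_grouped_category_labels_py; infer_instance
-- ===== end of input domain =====

-- B builds the filtered (key, label) pairs once, then emits one joined entry per distinct key
-- (first-occurrence order) instead of A's dict-of-lists accumulation followed by an in-place join pass.
-- Objective: alternative decomposition, same cost.

-- shared helper: str.capitalize() (exact on ASCII: first char uppercased, rest lowercased)
def pyCapitalize (s : String) : String :=
  match s.toList with
  | [] => ""
  | c :: rest => String.ofList (PySem.Chars.upperChar c :: PySem.Chars.lower rest)

-- shared helper: f"{cat_type.capitalize()}Categories"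
def pyKeyName (t : String) : String := pyCapitalize t ++ "Categories"

-- B's `pairs` comprehension: the filtered (key_name, label) pairs
def pvPairs (categories_list : List (List (String × String))) : List (String × String) :=
  categories_list.filterMap (fun c =>
    let t := ((PySem.Dict.mk c).get? "type").getD ""
    let l := ((PySem.Dict.mk c).get? "label").getD ""
    if t ≠ "" ∧ l ≠ "" then some (pyKeyName t, l) else none)

-- ===== PORT A =====
def get_grouped_category_labels_py (categories_list : List (List (String × String))) : List (String × String) :=
  -- dict of lists accumulated per category; 'if key_name not in d: d[k]=[]; d[k].append(l)' = modify k [] (· ++ [l])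
  (categories_list.foldl (fun d category =>
    let cat_type := ((PySem.Dict.mk category).get? "type").getD ""
    let cat_label := ((PySem.Dict.mk category).get? "label").getD ""
    if cat_type ≠ "" ∧ cat_label ≠ "" then
      d.modify (pyKeyName cat_type) [] (fun x => x ++ [cat_label])
    else d) (PySem.Dict.empty)
  -- second loop: replace each value (in place, order kept) by ", ".join(labels)
  ).items.map (fun p => (p.1, PySem.Str.join ", " p.2))

-- ===== PORT B =====
def get_grouped_category_labels_py_alt (categories_list : List (List (String × String))) : List (String × String) :=
  -- keys = list(dict.fromkeys(...)): distinct keys in first-occurrence order = PySem.Set.ofList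
  (PySem.Set.ofList ((pvPairs categories_list).map (fun p => p.1))).map
    (fun k => (k, PySem.Str.join ", " (((pvPairs categories_list).filter (fun p => p.1 == k)).map (fun p => p.2))))

-- ===== PRECONDITION & SPEC =====
def Spec_get_grouped_category_labels_py (categories_list : List (List (String × String))) (out : List (String × String)) : Prop := out = get_grouped_category_labels_py_alt categories_list
instance (categories_list : List (List (String × String))) (out : List (String × String)) : Decidable (Spec_get_grouped_category_labels_py categories_list out) := by unfold Spec_get_grouped_category_labels_py; infer_instance

-- ===== CLAIM (what is proved, stated in full; the proofs are below) =====
def Claim_equal_get_grouped_category_labels_py : Prop := ∀ (categories_list : List (List (String × String))), Dom_get_grouped_category_labels_py categories_list → Spec_get_grouped_category_labels_py categories_list (get_grouped_category_labels_py categories_list)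

-- ===== LEMMAS AND PROOFS =====

-- A's accumulation loop over categories equals the plain modify-fold over the filtered pairs
theorem foldA_eq_foldPairs (cs : List (List (String × String))) (d : PySem.Dict String (List String)) :
    cs.foldl (fun d category =>
      let cat_type := ((PySem.Dict.mk category).get? "type").getD ""
      let cat_label := ((PySem.Dict.mk category).get? "label").getD ""
      if cat_type ≠ "" ∧ cat_label ≠ "" then
        d.modify (pyKeyName cat_type) [] (fun x => x ++ [cat_label])
      else d) d
    = (pvPairs cs).foldl (fun d p => d.modify p.1 [] (fun x => x ++ [p.2])) d := by
  induction cs generalizing d with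
  | nil => rfl
  | cons c cs ih =>
    simp only [List.foldl_cons, pvPairs, List.filterMap_cons]
    by_cases h : ((PySem.Dict.mk c).get? "type").getD "" ≠ "" ∧ ((PySem.Dict.mk c).get? "label").getD "" ≠ ""
    · simp only [if_pos h, List.foldl_cons]
      exact ih _
    · simp only [if_neg h]
      exact ih _

theorem get_grouped_eq (cs : List (List (String × String))) :
    get_grouped_category_labels_py cs = get_grouped_category_labels_py_alt cs := by
  unfold get_grouped_category_labels_py get_grouped_category_labels_py_alt
  rw [foldA_eq_foldPairs]
  set ps := pvPairs cs with hps
  set D := ps.foldl (fun d p => d.modify p.1 [] (fun x => x ++ [p.2])) PySem.Dict.empty with hD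
  have hnodup : D.keys.Nodup := by
    rw [hD]
    exact PySem.Dict.nodup_keys_foldl_modify_key ps (fun p => p.1) [] (fun _ p => fun x => x ++ [p.2]) _ PySem.Dict.nodup_keys_empty
  have hkeys : D.keys = PySem.Set.ofList (ps.map (fun p => p.1)) := by
    rw [hD]
    have := PySem.Dict.keys_foldl_modify_key ps (fun p => p.1) [] (fun _ p => fun x => x ++ [p.2]) PySem.Dict.empty
    simpa [PySem.Set.update, PySem.Set.ofList, PySem.Dict.keys_empty] using this
  have hgetD : ∀ k, D.getD k [] = (ps.filter (fun p => p.1 == k)).map (fun p => p.2) := by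
    intro k
    rw [hD]
    simpa using PySem.Dict.getD_foldl_modify_append ps PySem.Dict.empty k
  rw [PySem.Dict.items_eq_map_keys D hnodup [], hkeys]
  simp only [List.map_map, Function.comp_def]
  congr 1
  funext k
  rw [hgetD k]

-- ===== VERDICT (by name: the statement is the Claim_ definition above) =====
theorem get_grouped_category_labels_py_spec : Claim_equal_get_grouped_category_labels_py := by
  intro cs _
  unfold Spec_get_grouped_category_labels_py
  exact get_grouped_eq cs
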